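-- pv_equiv track=rewrite | github.com/Sefaria/Sefaria-Data | data_utilities/text_align.py | initialize_indices
-- ===== SOURCE A (Python) =====
-- def initialize_indices(word_list, segments):
--     offset = 0
--     max_index = len(word_list)
--
--     while True:
--         indices = []
--         retry = False
--         for i, segment in enumerate(segments[:-1]):
--             if i == 0:
--                 cur_index = len(segment.split()) + offset
--             else:
--                 cur_index = indices[-1] + len(segment.split()) + offset
--
--             if cur_index >= max_index:
--                 retry = True
--                 offset -= 1
--                 break
--             indices.append(cur_index)
--
--         if not retry:
--             break
--     return indices
-- ===== SOURCE B (Python) =====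
-- def initialize_indices(word_list, segments):
--     n = len(word_list)
--     prefix = []
--     total = 0
--     for segment in segments[:-1]:
--         total += len(segment.split())
--         prefix.append(total)
--     offset = 0
--     for k, p in enumerate(prefix):
--         offset = min(offset, (n - 1 - p) // (k + 1))
--     return [p + (k + 1) * offset for k, p in enumerate(prefix)]
-- ===== Notes on version B (the rewrite author's own statement) =====
-- stated objective: alternative
-- what changed: A repeatedly rescans all segments, decrementing the offset by one per failed pass until every index fits; B computes the prefix word counts once and solves for the offset in closed form as min(0, min_k (n-1-prefix_k)//(k+1)), emitting the indices in one final pass.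
import Mathlib
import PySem

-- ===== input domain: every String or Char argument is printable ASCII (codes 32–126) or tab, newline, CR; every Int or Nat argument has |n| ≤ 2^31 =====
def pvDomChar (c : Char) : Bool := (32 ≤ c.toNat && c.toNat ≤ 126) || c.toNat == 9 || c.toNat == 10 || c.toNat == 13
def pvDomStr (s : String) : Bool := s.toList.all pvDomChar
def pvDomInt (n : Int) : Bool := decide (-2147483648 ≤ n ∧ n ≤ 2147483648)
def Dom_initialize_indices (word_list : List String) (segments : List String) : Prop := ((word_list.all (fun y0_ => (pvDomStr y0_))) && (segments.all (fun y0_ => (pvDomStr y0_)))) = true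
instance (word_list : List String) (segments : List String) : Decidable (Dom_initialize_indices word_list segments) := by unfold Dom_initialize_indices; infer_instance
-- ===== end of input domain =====

-- B replaces A's retry-the-whole-scan loop by a single precomputation: prefix word counts
-- once, the offset solved in closed form as a min of floor-division constraints (objective: alternative).


-- ===== PORT A =====
-- len(segment.split())
def pvWc (s : String) : Int := ((PySem.Str.split₀ s).length : Int)

-- the inner 'for i, segment in enumerate(segments[:-1])' loop; 'last' tracks indices[-1]
-- (none exactly when i == 0, matching the 'if i == 0' branch), 'acc' holds indices reversed;
-- none = the 'retry' break, some = the finished indices list.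
def pvInnerA (n off : Int) : List String → Option Int → List Int → Option (List Int)
  | [], _, acc => some acc.reverse
  | seg :: rest, last, acc =>
    let cur : Int := match last with
      | none => pvWc seg + off
      | some l => l + pvWc seg + off
    if n ≤ cur then none
    else pvInnerA n off rest (some cur) (cur :: acc)

def pvWcSum (segs : List String) : Int := (segs.map pvWc).sum

-- termination bound for the outer 'while True' loop: a retry needs off ≥ n - total word count
theorem pvInnerA_none_bound (n off : Int) (segs : List String) (last : Option Int)
    (acc : List Int) (hoff : off ≤ 0) (h : pvInnerA n off segs last acc = none) :
    n ≤ last.getD 0 + pvWcSum segs + off := by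
  induction segs generalizing last acc with
  | nil => simp [pvInnerA] at h
  | cons seg rest ih =>
    have hwc : (0:Int) ≤ pvWc seg := by simp [pvWc]
    have hsum : (0:Int) ≤ pvWcSum rest := by
      simp only [pvWcSum]
      apply List.sum_nonneg
      intro x hx
      simp only [List.mem_map] at hx
      obtain ⟨s, _, rfl⟩ := hx
      simp [pvWc]
    have hsc : pvWcSum (seg :: rest) = pvWc seg + pvWcSum rest := by simp [pvWcSum]
    rcases last with _ | l <;>
      · simp only [pvInnerA, Option.getD_none, Option.getD_some] at h ⊢
        split_ifs at h with hge
        · omega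
        · have := ih _ _ h
          simp only [Option.getD_some] at this
          omega

-- the outer 'while True' loop over decreasing offset
def pvLoopA (segs : List String) (n : Int) (off : Int) (h : off ≤ 0) : List Int :=
  match hm : pvInnerA n off segs none [] with
  | some ind => ind
  | none => pvLoopA segs n (off - 1) (by omega)
termination_by (off + pvWcSum segs - n + 1).toNat
decreasing_by
  have hb := pvInnerA_none_bound n off segs none [] h hm
  simp only [Option.getD_none] at hb
  omega

def initialize_indices (word_list : List String) (segments : List String) : List Int :=
  pvLoopA (PySem.List.slice segments none (some (-1))) ((word_list.length : Int)) 0 le_rfl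

-- ===== PORT B =====
def initialize_indices_alt (word_list : List String) (segments : List String) : List Int :=
  let n : Int := (word_list.length : Int)
  let pref := ((PySem.List.slice segments none (some (-1))).foldl
      (fun (st : Int × List Int) seg =>
        let t := st.1 + pvWc seg
        (t, st.2 ++ [t])) ((0 : Int), ([] : List Int))).2
  let offset := (PySem.List.enumerate pref 0).foldl
      (fun o kp => min o (PySem.Int.floordiv (n - 1 - kp.2) (kp.1 + 1))) 0
  (PySem.List.enumerate pref 0).map (fun kp => kp.2 + (kp.1 + 1) * offset)

-- ===== PRECONDITION & SPEC =====
def Spec_initialize_indices (word_list : List String) (segments : List String) (out : List Int) : Prop := out = initialize_indices_alt word_list segments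
instance (word_list : List String) (segments : List String) (out : List Int) : Decidable (Spec_initialize_indices word_list segments out) := by unfold Spec_initialize_indices; infer_instance

-- ===== CLAIM (what is proved, stated in full; the proofs are below) =====
def Claim_equal_initialize_indices : Prop := ∀ (word_list : List String) (segments : List String), Dom_initialize_indices word_list segments → Spec_initialize_indices word_list segments (initialize_indices word_list segments)

-- ===== LEMMAS AND PROOFS =====

-- the candidate index list at a given offset, from base b, over word counts cs
def pvIdxs (off : Int) : List Int → Int → List Int
  | [], _ => []
  | c :: rest, b => (b + c + off) :: pvIdxs off rest (b + c + off)

def pvCounts (segs : List String) : List Int := segs.map pvWc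

-- prefix sums from running total t (what B's first loop builds)
def pvPref : List Int → Int → List Int
  | [], _ => []
  | c :: rest, t => (t + c) :: pvPref rest (t + c)

theorem pvInnerA_none_start (n off : Int) (segs : List String) (acc : List Int) :
    pvInnerA n off segs none acc = pvInnerA n off segs (some 0) acc := by
  cases segs <;> simp [pvInnerA]

theorem pvInnerA_some_char (n off : Int) (segs : List String) (b : Int) (acc : List Int)
    (h : ∀ x ∈ pvIdxs off (pvCounts segs) b, x < n) :
    pvInnerA n off segs (some b) acc = some (acc.reverse ++ pvIdxs off (pvCounts segs) b) := by
  induction segs generalizing b acc with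
  | nil => simp [pvInnerA, pvIdxs, pvCounts]
  | cons seg rest ih =>
    simp only [pvCounts, List.map_cons, pvIdxs] at h ⊢
    have h0 := h _ (List.mem_cons_self ..)
    simp only [pvInnerA]
    rw [if_neg (by omega)]
    rw [ih (b + pvWc seg + off) _ (by intro x hx; exact h x (List.mem_cons_of_mem _ hx))]
    simp [pvCounts]

theorem pvInnerA_none_char (n off : Int) (segs : List String) (b : Int) (acc : List Int)
    (h : ∃ x ∈ pvIdxs off (pvCounts segs) b, n ≤ x) :
    pvInnerA n off segs (some b) acc = none := by
  induction segs generalizing b acc with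
  | nil => simp [pvIdxs, pvCounts] at h
  | cons seg rest ih =>
    simp only [pvCounts, List.map_cons, pvIdxs] at h
    simp only [pvInnerA]
    by_cases hge : n ≤ b + pvWc seg + off
    · rw [if_pos hge]
    · rw [if_neg hge]
      apply ih
      simp only [List.mem_cons] at h
      obtain ⟨x, hx | hx, hnx⟩ := h
      · omega
      · exact ⟨x, by simpa [pvCounts] using hx, hnx⟩

-- idxs at offset off = B's output map over the enumerated prefix sums
theorem pvIdxs_eq_map (off : Int) (cs : List Int) (t : Int) (s : Int) :
    pvIdxs off cs (t + s * off) =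
      (PySem.List.enumerate (pvPref cs t) s).map (fun kp => kp.2 + (kp.1 + 1) * off) := by
  induction cs generalizing t s with
  | nil => simp [pvIdxs, pvPref]
  | cons c rest ih =>
    simp only [pvIdxs, pvPref, PySem.List.enumerate_cons, List.map_cons]
    rw [show t + s * off + c + off = t + c + (s + 1) * off by ring, ih (t + c) (s + 1)]

-- B's prefix-building fold
theorem pvFoldPref (segs : List String) (t : Int) (l : List Int) :
    (segs.foldl (fun (st : Int × List Int) seg =>
        let tt := st.1 + pvWc seg
        (tt, st.2 ++ [tt])) (t, l)).2 = l ++ pvPref (pvCounts segs) t := by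
  induction segs generalizing t l with
  | nil => simp [pvCounts, pvPref]
  | cons seg rest ih => simp [List.foldl_cons, ih, pvCounts, pvPref]

-- foldl-min facts for B's offset loop
theorem pvFoldMin_le_init (f : Int × Int → Int) (l : List (Int × Int)) (a : Int) :
    l.foldl (fun o kp => min o (f kp)) a ≤ a := by
  induction l generalizing a with
  | nil => simp
  | cons kp rest ih => exact le_trans (ih _) (by simp)

theorem pvFoldMin_le_mem (f : Int × Int → Int) (l : List (Int × Int)) (a : Int)
    (kp : Int × Int) (h : kp ∈ l) : l.foldl (fun o kp => min o (f kp)) a ≤ f kp := by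
  induction l generalizing a with
  | nil => simp at h
  | cons q rest ih =>
    rcases List.mem_cons.mp h with rfl | h
    · exact le_trans (pvFoldMin_le_init f rest _) (by simp)
    · exact ih _ h

theorem pvLe_foldMin (f : Int × Int → Int) (l : List (Int × Int)) (a x : Int)
    (ha : x ≤ a) (h : ∀ kp ∈ l, x ≤ f kp) :
    x ≤ l.foldl (fun o kp => min o (f kp)) a := by
  induction l generalizing a with
  | nil => simpa
  | cons q rest ih =>
    exact ih _ (le_min ha (h q (List.mem_cons_self ..))) (fun kp hkp => h kp (List.mem_cons_of_mem _ hkp))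

-- feasibility of an offset ↔ it is below every floor constraint
theorem pvFeas_iff (n off : Int) (cs : List Int) :
    (∀ x ∈ pvIdxs off cs 0, x < n) ↔
      (∀ kp ∈ PySem.List.enumerate (pvPref cs 0) 0,
        off ≤ PySem.Int.floordiv (n - 1 - kp.2) (kp.1 + 1)) := by
  have he : pvIdxs off cs 0 =
      (PySem.List.enumerate (pvPref cs 0) 0).map (fun kp => kp.2 + (kp.1 + 1) * off) := by
    have := pvIdxs_eq_map off cs 0 0
    simpa using this
  rw [he]
  simp only [List.mem_map]
  constructor
  · intro h kp hkp
    have hk : 0 ≤ kp.1 := by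
      obtain ⟨k, hklt, rfl⟩ := (PySem.List.mem_enumerate_iff _ _ _).mp hkp
      simp
    have hlt := h _ ⟨kp, hkp, rfl⟩
    rw [PySem.Int.le_floordiv_iff_mul_le (by omega)]
    nlinarith
  · intro h x hx
    obtain ⟨kp, hkp, rfl⟩ := hx
    have hk : 0 ≤ kp.1 := by
      obtain ⟨k, hklt, rfl⟩ := (PySem.List.mem_enumerate_iff _ _ _).mp hkp
      simp
    have := h kp hkp
    rw [PySem.Int.le_floordiv_iff_mul_le (by omega)] at this
    nlinarith

-- the outer loop returns B's index list, whenever started at or above B's offset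
theorem pvLoopA_eq (segs : List String) (n : Int) (ostar : Int)
    (hostar : ostar = (PySem.List.enumerate (pvPref (pvCounts segs) 0) 0).foldl
      (fun o kp => min o (PySem.Int.floordiv (n - 1 - kp.2) (kp.1 + 1))) 0) :
    ∀ (k : Nat) (off : Int) (h : off ≤ 0), ostar ≤ off → (off - ostar).toNat = k →
      pvLoopA segs n off h = pvIdxs ostar (pvCounts segs) 0 := by
  intro k
  induction k with
  | zero =>
    intro off h hle hk
    have : off = ostar := by omega
    subst this
    have hfeas : ∀ x ∈ pvIdxs off (pvCounts segs) 0, x < n := by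
      rw [pvFeas_iff]
      intro kp hkp
      rw [hostar]
      exact pvFoldMin_le_mem _ _ _ kp hkp
    rw [pvLoopA]
    rw [pvInnerA_none_start, pvInnerA_some_char n off segs 0 [] hfeas]
    simp
  | succ k ih =>
    intro off h hle hk
    by_cases hfeas : ∀ x ∈ pvIdxs off (pvCounts segs) 0, x < n
    · -- feasible already: off ≤ ostar, so off = ostar, contradiction with toNat = k+1
      have : off ≤ ostar := by
        rw [hostar]
        apply pvLe_foldMin _ _ _ _ h
        exact (pvFeas_iff n off (pvCounts segs)).mp hfeas
      omega
    · push Not at hfeas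
      obtain ⟨x, hx, hnx⟩ := hfeas
      rw [pvLoopA]
      rw [pvInnerA_none_start, pvInnerA_none_char n off segs 0 [] ⟨x, hx, by omega⟩]
      exact ih (off - 1) (by omega) (by omega) (by omega)

-- ===== VERDICT (by name: the statement is the Claim_ definition above) =====
theorem initialize_indices_spec : Claim_equal_initialize_indices := by
  intro word_list segments _
  unfold Spec_initialize_indices initialize_indices initialize_indices_alt
  set segs := PySem.List.slice segments none (some (-1)) with hsegs
  set n : Int := (word_list.length : Int) with hn
  rw [pvFoldPref segs 0 []]
  simp only [List.nil_append]
  set ostar := (PySem.List.enumerate (pvPref (pvCounts segs) 0) 0).foldl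
      (fun o kp => min o (PySem.Int.floordiv (n - 1 - kp.2) (kp.1 + 1))) 0 with hostar
  have h0 : ostar ≤ 0 := pvFoldMin_le_init _ _ _
  rw [pvLoopA_eq segs n ostar hostar (0 - ostar).toNat 0 le_rfl h0 rfl]
  have := pvIdxs_eq_map ostar (pvCounts segs) 0 0
  simpa using this
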